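-- pv_equiv track=rewrite | github.com/Adisha2/45-Days-Code | Day 15 - PETSTORE.py | can_alice_and_bob_have_same_multiset
-- ===== SOURCE A (Python) =====
-- def can_alice_and_bob_have_same_multiset(test_cases):
--     results = []
--     for animals in test_cases:
--         from collections import Counter
--         count = Counter(animals)
--
--         # Check if all counts are even
--         if all(c % 2 == 0 for c in count.values()):
--             results.append("YES")
--         else:
--             results.append("NO")
--
--     return results
-- ===== SOURCE B (Python) =====
-- def can_alice_and_bob_have_same_multiset(test_cases):
--     def all_even(animals):
--         # toggle pass: track the elements currently seen an odd number of times
--         odd = set()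
--         for a in animals:
--             if a in odd:
--                 odd.remove(a)
--             else:
--                 odd.add(a)
--         return not odd
--     return ["YES" if all_even(animals) else "NO" for animals in test_cases]
-- ===== Notes on version B (the rewrite author's own statement) =====
-- stated objective: idiomatic
-- what changed: Replaces the Counter table plus the all(c % 2 == 0) scan over its values by a single toggling pass that keeps only the set of elements seen an odd number of times and tests that set for emptiness; the result list is built by a comprehension instead of an append loop.
import Mathlib
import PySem

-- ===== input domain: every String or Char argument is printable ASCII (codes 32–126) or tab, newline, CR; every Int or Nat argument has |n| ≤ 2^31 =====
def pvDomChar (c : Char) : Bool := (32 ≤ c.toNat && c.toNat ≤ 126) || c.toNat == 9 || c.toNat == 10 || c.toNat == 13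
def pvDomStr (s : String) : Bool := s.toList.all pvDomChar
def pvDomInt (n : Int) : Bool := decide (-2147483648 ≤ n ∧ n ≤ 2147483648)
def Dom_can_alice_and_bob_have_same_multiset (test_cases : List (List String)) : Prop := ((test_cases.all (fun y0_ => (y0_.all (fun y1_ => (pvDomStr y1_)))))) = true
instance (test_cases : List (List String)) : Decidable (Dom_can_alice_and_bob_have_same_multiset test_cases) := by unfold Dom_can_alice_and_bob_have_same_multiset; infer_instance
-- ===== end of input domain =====

-- B builds each verdict by a toggling pass over a set of odd-count elements instead of A's
-- Counter table followed by an all-counts-even scan (idiomatic; same asymptotic cost).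

-- ===== PORT A =====
-- count = Counter(animals); "YES" if all counts are even else "NO"
def pvJudgeA (animals : List String) : String :=
  let count := PySem.Dict.counter animals
  if count.values.all (fun c => PySem.Int.mod c 2 == 0) then "YES" else "NO"

def can_alice_and_bob_have_same_multiset (test_cases : List (List String)) : List String :=
  test_cases.foldl (fun results animals => results ++ [pvJudgeA animals]) []

-- ===== PORT B =====
-- one toggle step: remove if present (Set.discard = set.remove under the membership guard), else add
def pvToggle (s : PySem.Set String) (a : String) : PySem.Set String :=
  if PySem.Set.contains s a then PySem.Set.discard s a else PySem.Set.add s a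

def pvAllEven (animals : List String) : Bool :=
  (animals.foldl pvToggle PySem.Set.empty).isEmpty

def can_alice_and_bob_have_same_multiset_alt (test_cases : List (List String)) : List String :=
  test_cases.map (fun animals => if pvAllEven animals then "YES" else "NO")

-- ===== PRECONDITION & SPEC =====
def Spec_can_alice_and_bob_have_same_multiset (test_cases : List (List String)) (out : List String) : Prop := out = can_alice_and_bob_have_same_multiset_alt test_cases
instance (test_cases : List (List String)) (out : List String) : Decidable (Spec_can_alice_and_bob_have_same_multiset test_cases out) := by unfold Spec_can_alice_and_bob_have_same_multiset; infer_instance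

-- ===== CLAIM (what is proved, stated in full; the proofs are below) =====
def Claim_equal_can_alice_and_bob_have_same_multiset : Prop := ∀ (test_cases : List (List String)), Dom_can_alice_and_bob_have_same_multiset test_cases → Spec_can_alice_and_bob_have_same_multiset test_cases (can_alice_and_bob_have_same_multiset test_cases)

-- ===== LEMMAS AND PROOFS =====

-- one toggle step, as a membership statement
lemma mem_pvToggle (s : PySem.Set String) (a x : String) :
    x ∈ pvToggle s a ↔ ((x ∈ s ∧ x ≠ a) ∨ (a ∉ s ∧ x = a)) := by
  unfold pvToggle
  by_cases ha : a ∈ s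
  · rw [if_pos ((PySem.Set.contains_iff s a).mpr ha), PySem.Set.mem_discard]
    constructor
    · exact fun h => Or.inl h
    · rintro (h | ⟨hna, rfl⟩) ; exact h ; exact absurd ha hna
  · rw [if_neg (fun hc => ha ((PySem.Set.contains_iff s a).mp hc)), PySem.Set.mem_add]
    constructor
    · rintro (h | rfl)
      · by_cases hxa : x = a
        · subst hxa; exact Or.inr ⟨ha, rfl⟩
        · exact Or.inl ⟨h, hxa⟩
      · exact Or.inr ⟨ha, rfl⟩
    · rintro (⟨h, _⟩ | ⟨_, rfl⟩) ; exact Or.inl h ; exact Or.inr rfl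

-- invariant of B's toggling pass: x ends up in the set iff (x ∈ start) XOR (x has odd count in l)
lemma mem_foldl_toggle (l : List String) (s : PySem.Set String) (x : String) :
    x ∈ l.foldl pvToggle s ↔ (x ∈ s ↔ l.count x % 2 = 0) := by
  induction l generalizing s with
  | nil => simp
  | cons a t ih =>
    simp only [List.foldl_cons, ih, mem_pvToggle, List.count_cons]
    have hpar := Nat.mod_two_eq_zero_or_one (t.count x)
    by_cases hx : x = a
    · subst hx
      simp only [BEq.rfl, if_true, ne_eq, not_true_eq_false, and_false, false_or, and_true]
      by_cases ha : x ∈ s <;> simp [ha] <;> omega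
    · have hne : (a == x) = false := beq_eq_false_iff_ne.mpr (Ne.symm hx)
      simp [hne, hx]

lemma allEven_iff (l : List String) :
    pvAllEven l = true ↔ ∀ x, l.count x % 2 = 0 := by
  unfold pvAllEven
  rw [List.isEmpty_iff, List.eq_nil_iff_forall_not_mem]
  constructor
  · intro h x
    have hm := mem_foldl_toggle l PySem.Set.empty x
    have hx := h x
    have hempty : x ∉ (PySem.Set.empty : PySem.Set String) := by simp [PySem.Set.empty]
    rcases Nat.mod_two_eq_zero_or_one (l.count x) with h0 | h1
    · exact h0
    · exact absurd (hm.mpr (by simp [h1])) hx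
  · intro h x hx
    have := (mem_foldl_toggle l PySem.Set.empty x).mp hx
    simp [PySem.Set.empty, h x] at this

-- A's condition, characterised the same way
lemma judgeA_cond_iff (l : List String) :
    (PySem.Dict.counter l (κ := String)).values.all (fun c => PySem.Int.mod c 2 == 0) = true
      ↔ ∀ x, l.count x % 2 = 0 := by
  rw [PySem.Dict.values_eq_map_keys _ (PySem.Dict.nodup_keys_counter l) 0]
  simp only [List.all_map, List.all_eq_true, PySem.Dict.keys_counter,
    PySem.Set.mem_ofList, Function.comp, PySem.Dict.getD_counter]
  constructor
  · intro h x
    by_cases hx : x ∈ l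
    · have h2 : PySem.Int.mod ((l.count x : Int)) 2 = 0 := by simpa using h x hx
      have := (PySem.Int.mod_eq_zero_iff_dvd _ _).mp h2
      omega
    · simp [List.count_eq_zero_of_not_mem hx]
  · intro h x _
    have h2 : (2 : Int) ∣ (l.count x : Int) := by have := h x; omega
    simp [h2]

lemma judge_eq (l : List String) :
    pvJudgeA l = (if pvAllEven l then "YES" else "NO") := by
  unfold pvJudgeA
  by_cases h : ∀ x, l.count x % 2 = 0
  · rw [if_pos ((judgeA_cond_iff l).mpr h), if_pos ((allEven_iff l).mpr h)]
  · rw [if_neg (fun hc => h ((judgeA_cond_iff l).mp hc)),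
        if_neg (fun hc => h ((allEven_iff l).mp hc))]

-- ===== VERDICT (by name: the statement is the Claim_ definition above) =====
theorem can_alice_and_bob_have_same_multiset_spec : Claim_equal_can_alice_and_bob_have_same_multiset := by
  intro test_cases _
  show _ = _
  unfold can_alice_and_bob_have_same_multiset can_alice_and_bob_have_same_multiset_alt
  rw [PySem.List.foldl_append_singleton_eq_map]
  exact List.map_congr_left (fun l _ => judge_eq l)
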